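-- pv_equiv track=rewrite | github.com/itswillis/LAB | LAB06 Sorting/Q3.py | get_position_of_largest
-- ===== SOURCE A (Python) =====
-- def get_position_of_largest(data, index):
-- # SORTED =>[12, 24, 48, 53, 76]
--     largest_number = data[0]
--     position_of_largest = 0
--
--     for i in range(1, index+1):
--         if data[i] > largest_number:
--             largest_number = data[i]
--             position_of_largest = i
--
--     return position_of_largest
-- ===== SOURCE B (Python) =====
-- def get_position_of_largest(data, index):
--     # Two-pass idiom: max over the prefix, then first position of that max.
--     sub = data[:index + 1]
--     return sub.index(max(sub))
-- ===== Notes on version B (the rewrite author's own statement) =====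
-- stated objective: idiomatic
-- what changed: Replaces the fused manual tracking loop by the standard two-pass idiom: slice the prefix, take max() of it, and locate the first occurrence with .index().
-- outside the precondition, e.g. on get_position_of_largest([5], -1): A returns 0, B raises ValueError; on get_position_of_largest([3, 5, 1], -2): A returns 0, B returns 1; on get_position_of_largest([5, 3], -2): A returns 0, B returns 0
import Mathlib
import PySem

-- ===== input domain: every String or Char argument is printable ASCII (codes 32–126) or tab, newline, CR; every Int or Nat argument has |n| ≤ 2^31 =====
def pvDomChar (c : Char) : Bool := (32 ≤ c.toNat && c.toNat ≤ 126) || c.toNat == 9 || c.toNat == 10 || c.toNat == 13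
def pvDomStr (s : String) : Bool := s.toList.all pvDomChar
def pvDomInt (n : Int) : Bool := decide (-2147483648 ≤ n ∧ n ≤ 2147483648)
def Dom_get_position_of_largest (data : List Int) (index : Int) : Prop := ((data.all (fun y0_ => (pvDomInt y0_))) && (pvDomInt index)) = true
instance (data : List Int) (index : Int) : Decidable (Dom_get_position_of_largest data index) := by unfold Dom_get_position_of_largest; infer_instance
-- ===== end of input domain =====

-- B replaces A's fused max-tracking loop by the two-pass slice/max/index idiom; equal on 0 ≤ index < len(data).


-- ===== PORT A =====
-- for i in range(1, index+1): track (largest_number, position_of_largest)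
def get_position_of_largest (data : List Int) (index : Int) : Int :=
  ((PySem.List.pyRange 1 (index + 1) 1).foldl
    (fun (s : Int × Int) i =>
      if PySem.List.pyGetD data i 0 > s.1 then (PySem.List.pyGetD data i 0, i) else s)
    (PySem.List.pyGetD data 0 0, 0)).2

-- ===== PORT B =====
-- sub = data[:index+1]; return sub.index(max(sub))  (the none branch is Python's ValueError, excluded by Pre_)
def get_position_of_largest_alt (data : List Int) (index : Int) : Int :=
  let sub := PySem.List.slice data none (some (index + 1))
  match PySem.List.max? sub (fun x => x) with
  | none => 0
  | some m => ((PySem.List.index? sub m).getD 0 : Int)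

-- ===== PRECONDITION & SPEC =====
-- Pre_ excludes empty data (A raises IndexError), index ≥ len(data) (A raises IndexError in its loop), and
-- negative index: there A's empty loop returns 0, while B's Python slice bound counts from the end, so B
-- raises ValueError on an empty slice or returns the first-max position of a suffix-truncated list.
def Pre_get_position_of_largest (data : List Int) (index : Int) : Prop :=
  data ≠ [] ∧ 0 ≤ index ∧ index < (data.length : Int)
instance (data : List Int) (index : Int) : Decidable (Pre_get_position_of_largest data index) := by unfold Pre_get_position_of_largest; infer_instance
def pvWitness_get_position_of_largest : List Int × Int := ([3, 7, 7, 2], 2)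

def Spec_get_position_of_largest (data : List Int) (index : Int) (out : Int) : Prop := out = get_position_of_largest_alt data index
instance (data : List Int) (index : Int) (out : Int) : Decidable (Spec_get_position_of_largest data index out) := by unfold Spec_get_position_of_largest; infer_instance

-- ===== CLAIM (what is proved, stated in full; the proofs are below) =====
def Claim_equal_get_position_of_largest : Prop := ∀ (data : List Int) (index : Int), Dom_get_position_of_largest data index → Pre_get_position_of_largest data index → Spec_get_position_of_largest data index (get_position_of_largest data index)

-- ===== LEMMAS AND PROOFS =====

-- A's loop, run on a list l over indices 1..len(l)-1 with l itself as the indexed data.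
def afold (l : List Int) : Int × Int :=
  (PySem.List.pyRange 1 (l.length : Int) 1).foldl
    (fun (s : Int × Int) i =>
      if PySem.List.pyGetD l i 0 > s.1 then (PySem.List.pyGetD l i 0, i) else s)
    (PySem.List.pyGetD l 0 0, 0)

lemma afold_main (l : List Int) (hl : l ≠ []) :
    ∃ m : Int, PySem.List.max? l (fun x => x) = some m ∧
      afold l = (m, ((PySem.List.index? l m).getD 0 : Int)) := by
  induction l using List.reverseRecOn with
  | nil => exact absurd rfl hl
  | append_singleton l x ih =>
    rcases eq_or_ne l [] with rfl | hne
    · refine ⟨x, by simp [PySem.List.max?], ?_⟩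
      simp [afold, PySem.List.pyRange, PySem.List.index?]
    · obtain ⟨m, hm, ha⟩ := ih hne
      have hmem : m ∈ l := PySem.List.max?_mem hm
      have hmax : ∀ y ∈ l, y ≤ m := by
        intro y hy; exact PySem.List.max?_isMax (key := fun x => x) hm y hy
      have hlen1 : (1 : Int) ≤ (l.length : Int) := by
        have : 0 < l.length := List.length_pos_iff.mpr hne
        exact_mod_cast this
      -- range splits off the last index
      have hrange : PySem.List.pyRange 1 ((l ++ [x]).length : Int) 1
          = PySem.List.pyRange 1 (l.length : Int) 1 ++ [(l.length : Int)] := by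
        have : ((l ++ [x]).length : Int) = (l.length : Int) + 1 := by
          simp
        rw [this, PySem.List.pyRange_one_succ_right hlen1]
      -- indexing (l ++ [x]) below l.length agrees with indexing l
      have hcongr : ∀ (s : Int × Int), ∀ i ∈ PySem.List.pyRange 1 (l.length : Int) 1,
          (if PySem.List.pyGetD (l ++ [x]) i 0 > s.1 then (PySem.List.pyGetD (l ++ [x]) i 0, i) else s)
          = (if PySem.List.pyGetD l i 0 > s.1 then (PySem.List.pyGetD l i 0, i) else s) := by
        intro s i hi
        rw [PySem.List.mem_pyRange_one] at hi
        have h0 : 0 ≤ i := by omega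
        have hilt : i.toNat < l.length := by omega
        have : PySem.List.pyGetD (l ++ [x]) i 0 = PySem.List.pyGetD l i 0 := by
          rw [PySem.List.pyGetD_eq_getElem (l ++ [x]) 0 h0 (by simp; omega),
              PySem.List.pyGetD_eq_getElem l 0 h0 (by omega)]
          exact List.getElem_append_left hilt
        rw [this]
      have hinit : PySem.List.pyGetD (l ++ [x]) 0 0 = PySem.List.pyGetD l 0 0 := by
        rcases l with _ | ⟨a, l'⟩
        · exact absurd rfl hne
        · simp [PySem.List.pyGetD_zero_cons]
      have hlast : PySem.List.pyGetD (l ++ [x]) (l.length : Int) 0 = x := by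
        rw [PySem.List.pyGetD_natCast]
        simp
      -- unfold afold on l ++ [x]
      have hsplit : afold (l ++ [x])
          = (if PySem.List.pyGetD (l ++ [x]) (l.length : Int) 0 > (afold l).1
             then (PySem.List.pyGetD (l ++ [x]) (l.length : Int) 0, (l.length : Int))
             else afold l) := by
        unfold afold
        rw [hrange, List.foldl_append, hinit,
            PySem.List.foldl_congr_mem _ _ _ _ hcongr]
        simp
      rw [hlast, ha] at hsplit
      -- max? on l ++ [x]
      have hmax' : PySem.List.max? (l ++ [x]) (fun y => y)
          = if m < x then some x else some m := by
        have hm' := hm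
        unfold PySem.List.max? at hm' ⊢
        rw [List.foldl_append, hm']
        simp
      by_cases hc : m < x
      · refine ⟨x, by rw [hmax']; simp [hc], ?_⟩
        have hnotin : x ∉ l := fun hx => absurd (hmax x hx) (by omega)
        rw [hsplit, PySem.List.index?_append_singleton_self l x hnotin]
        simp [hc]
      · refine ⟨m, by rw [hmax']; simp [hc], ?_⟩
        rw [hsplit, PySem.List.index?_append_of_mem _ hmem]
        simp [hc]

-- A on (data, index) inside Pre_ is afold of the prefix data[:index+1].
lemma a_eq_afold (data : List Int) (index : Int) (h : Pre_get_position_of_largest data index) :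
    get_position_of_largest data index = (afold (data.take (index + 1).toNat)).2 := by
  obtain ⟨hne, h0, hlt⟩ := h
  set sub := data.take (index + 1).toNat with hsub
  have hsublen : sub.length = (index + 1).toNat := by
    simp [hsub]; omega
  have hlen : ((sub.length : Int)) = index + 1 := by
    rw [hsublen]; omega
  have hd : 0 < data.length := List.length_pos_iff.mpr hne
  have hs : 0 < sub.length := by omega
  have hinit : PySem.List.pyGetD data 0 0 = PySem.List.pyGetD sub 0 0 := by
    rw [PySem.List.pyGetD_eq_getElem data 0 le_rfl (by exact_mod_cast hd),
        PySem.List.pyGetD_eq_getElem sub 0 le_rfl (by exact_mod_cast hs)]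
    simp [hsub]
  unfold get_position_of_largest afold
  rw [hlen]
  congr 1
  rw [hinit]
  apply PySem.List.foldl_congr_mem
  intro s i hi
  rw [PySem.List.mem_pyRange_one] at hi
  have h0i : 0 ≤ i := by omega
  have hi1 : i.toNat < sub.length := by omega
  have hi2 : i.toNat < data.length := by omega
  have : PySem.List.pyGetD data i 0 = PySem.List.pyGetD sub i 0 := by
    rw [PySem.List.pyGetD_eq_getElem data 0 h0i (by omega),
        PySem.List.pyGetD_eq_getElem sub 0 h0i (by omega)]
    simp [hsub]
  rw [this]

-- ===== VERDICT (by name: the statement is the Claim_ definition above) =====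
theorem get_position_of_largest_spec : Claim_equal_get_position_of_largest := by
  intro data index _ hpre
  unfold Spec_get_position_of_largest
  obtain ⟨hne, h0, hlt⟩ := hpre
  have hsubne : data.take (index + 1).toNat ≠ [] := by
    have hd : 0 < data.length := List.length_pos_iff.mpr hne
    simp [List.take_eq_nil_iff]
    constructor <;> omega
  obtain ⟨m, hm, ha⟩ := afold_main _ hsubne
  rw [a_eq_afold data index ⟨hne, h0, hlt⟩, ha]
  simp only [get_position_of_largest_alt,
    PySem.List.slice_to data (show (0:Int) ≤ index + 1 by omega), hm]
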